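-- pv_equiv track=rewrite | github.com/FarhangAmaji/versatileAnn | dataPrep/utils_innerFuncs2.py | _assignIdxsWith1PossibleSet_thenRemoveFrom_idxs_possibleSets
-- ===== SOURCE A (Python) =====
-- def _assignIdxsWith1PossibleSet_thenRemoveFrom_idxs_possibleSets(idxs_possibleSets, setsIndexes,
--                                                                  indexes=None,
--                                                                  removeFromIndexesAlso=False):
--     idxsAssinged = []
--     for idx in idxs_possibleSets.keys():
--         # indexes which can only assigned to 1 group
--         if len(idxs_possibleSets[idx]) == 1:
--             snToBeAssigned = idxs_possibleSets[idx][0]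
--             setsIndexes[snToBeAssigned].append(idx)
--             idxsAssinged.append(idx)
--             if removeFromIndexesAlso:
--                 indexes.remove(idx)
--     # remove idxs_possibleSets already assigned
--     idxs_possibleSets = {idx: value for idx, value in idxs_possibleSets.items() if
--                          idx not in idxsAssinged}
--     return idxs_possibleSets
-- ===== SOURCE B (Python) =====
-- def _assignIdxsWith1PossibleSet_thenRemoveFrom_idxs_possibleSets(idxs_possibleSets, setsIndexes,
--                                                                  indexes=None,
--                                                                  removeFromIndexesAlso=False):
--     # single pass: assign singleton idxs and build the pruned dict as we go
--     remaining = {}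
--     for idx, value in idxs_possibleSets.items():
--         if len(value) == 1:
--             setsIndexes[value[0]].append(idx)
--             if removeFromIndexesAlso:
--                 indexes.remove(idx)
--         else:
--             remaining[idx] = value
--     return remaining
-- ===== Notes on version B (the rewrite author's own statement) =====
-- stated objective: simpler
-- what changed: Single pass that assigns singleton idxs and builds the pruned dict as it goes, removing A's idxsAssinged accumulator, its second filtering pass and its per-key 'idx not in idxsAssinged' list scan.
import Mathlib
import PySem

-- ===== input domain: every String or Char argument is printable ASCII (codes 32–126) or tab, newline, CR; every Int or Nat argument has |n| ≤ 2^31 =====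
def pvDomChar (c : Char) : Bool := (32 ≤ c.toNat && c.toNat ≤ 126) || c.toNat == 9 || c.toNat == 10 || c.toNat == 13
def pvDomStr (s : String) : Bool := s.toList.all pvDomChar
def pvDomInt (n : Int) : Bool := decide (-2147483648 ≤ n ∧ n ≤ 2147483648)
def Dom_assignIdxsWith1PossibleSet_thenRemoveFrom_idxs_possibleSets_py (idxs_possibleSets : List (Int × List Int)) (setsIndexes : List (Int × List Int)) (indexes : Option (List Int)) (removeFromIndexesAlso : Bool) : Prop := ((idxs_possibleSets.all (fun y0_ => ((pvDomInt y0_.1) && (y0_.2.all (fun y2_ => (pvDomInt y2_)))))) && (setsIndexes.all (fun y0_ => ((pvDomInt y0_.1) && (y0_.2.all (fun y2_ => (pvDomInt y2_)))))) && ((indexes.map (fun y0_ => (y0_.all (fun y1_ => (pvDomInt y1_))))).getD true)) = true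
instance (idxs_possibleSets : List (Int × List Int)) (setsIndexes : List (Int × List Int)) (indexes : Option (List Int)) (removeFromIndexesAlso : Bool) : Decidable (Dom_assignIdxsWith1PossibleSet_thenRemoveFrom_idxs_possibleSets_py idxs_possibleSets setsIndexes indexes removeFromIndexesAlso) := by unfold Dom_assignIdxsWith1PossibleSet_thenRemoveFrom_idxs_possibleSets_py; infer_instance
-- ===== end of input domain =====

-- B folds the pruning into the assignment loop (one pass, no idxsAssinged accumulator, no
-- membership scan) instead of A's loop-then-refilter; both Pythons mutate setsIndexes (and
-- possibly indexes) identically — the equivalence proved here is about the RETURN value.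

-- ===== PORT A =====
-- literal transliteration of A: build idxsAssinged over the keys, then re-filter the dict
def assignIdxsWith1PossibleSet_thenRemoveFrom_idxs_possibleSets_py (idxs_possibleSets : List (Int × List Int)) (setsIndexes : List (Int × List Int)) (indexes : Option (List Int)) (removeFromIndexesAlso : Bool) : List (Int × List Int) :=
  let d : PySem.Dict Int (List Int) := PySem.Dict.mk idxs_possibleSets
  let idxsAssinged : List Int :=
    d.keys.foldl (fun acc idx =>
      if (d.getD idx []).length = 1 then
        -- snToBeAssigned / setsIndexes[...].append / indexes.remove only mutate the
        -- arguments (never the returned dict); the return value does not depend on them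
        acc ++ [idx]
      else acc) []
  d.items.filter (fun p => !(idxsAssinged.contains p.1))

-- ===== PORT B =====
-- literal transliteration of B: one pass, non-singleton rows inserted into `remaining`
def assignIdxsWith1PossibleSet_thenRemoveFrom_idxs_possibleSets_py_alt (idxs_possibleSets : List (Int × List Int)) (setsIndexes : List (Int × List Int)) (indexes : Option (List Int)) (removeFromIndexesAlso : Bool) : List (Int × List Int) :=
  (idxs_possibleSets.foldl (fun remaining p =>
      if p.2.length = 1 then
        -- setsIndexes[value[0]].append(idx) / indexes.remove(idx): argument mutation only
        remaining
      else remaining.insert p.1 p.2)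
    (PySem.Dict.empty : PySem.Dict Int (List Int))).items

-- ===== PRECONDITION & SPEC =====
-- Pre_ excludes only (a) assoc lists with duplicate keys in idxs_possibleSets (no Python dict
-- produces them) and (b) the inputs where A raises: a singleton row whose set id is missing
-- from setsIndexes (KeyError), or removeFromIndexesAlso with the row's idx absent from
-- indexes (ValueError; AttributeError when indexes is None).
def Pre_assignIdxsWith1PossibleSet_thenRemoveFrom_idxs_possibleSets_py (idxs_possibleSets : List (Int × List Int)) (setsIndexes : List (Int × List Int)) (indexes : Option (List Int)) (removeFromIndexesAlso : Bool) : Prop :=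
  (idxs_possibleSets.map Prod.fst).Nodup ∧
  ∀ p ∈ idxs_possibleSets, p.2.length = 1 →
    p.2.headI ∈ setsIndexes.map Prod.fst ∧
    (removeFromIndexesAlso = true → p.1 ∈ indexes.getD [])
instance (idxs_possibleSets : List (Int × List Int)) (setsIndexes : List (Int × List Int)) (indexes : Option (List Int)) (removeFromIndexesAlso : Bool) : Decidable (Pre_assignIdxsWith1PossibleSet_thenRemoveFrom_idxs_possibleSets_py idxs_possibleSets setsIndexes indexes removeFromIndexesAlso) := by unfold Pre_assignIdxsWith1PossibleSet_thenRemoveFrom_idxs_possibleSets_py; infer_instance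

def pvWitness_assignIdxsWith1PossibleSet_thenRemoveFrom_idxs_possibleSets_py : (List (Int × List Int)) × (List (Int × List Int)) × Option (List Int) × Bool :=
  ([(0, [1]), (2, [3, 4])], [(1, [])], some [0], true)

def Spec_assignIdxsWith1PossibleSet_thenRemoveFrom_idxs_possibleSets_py (idxs_possibleSets : List (Int × List Int)) (setsIndexes : List (Int × List Int)) (indexes : Option (List Int)) (removeFromIndexesAlso : Bool) (out : List (Int × List Int)) : Prop := out = assignIdxsWith1PossibleSet_thenRemoveFrom_idxs_possibleSets_py_alt idxs_possibleSets setsIndexes indexes removeFromIndexesAlso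
instance (idxs_possibleSets : List (Int × List Int)) (setsIndexes : List (Int × List Int)) (indexes : Option (List Int)) (removeFromIndexesAlso : Bool) (out : List (Int × List Int)) : Decidable (Spec_assignIdxsWith1PossibleSet_thenRemoveFrom_idxs_possibleSets_py idxs_possibleSets setsIndexes indexes removeFromIndexesAlso out) := by unfold Spec_assignIdxsWith1PossibleSet_thenRemoveFrom_idxs_possibleSets_py; infer_instance

-- ===== CLAIM (what is proved, stated in full; the proofs are below) =====
def Claim_equal_assignIdxsWith1PossibleSet_thenRemoveFrom_idxs_possibleSets_py : Prop := ∀ (idxs_possibleSets : List (Int × List Int)) (setsIndexes : List (Int × List Int)) (indexes : Option (List Int)) (removeFromIndexesAlso : Bool), Dom_assignIdxsWith1PossibleSet_thenRemoveFrom_idxs_possibleSets_py idxs_possibleSets setsIndexes indexes removeFromIndexesAlso → Pre_assignIdxsWith1PossibleSet_thenRemoveFrom_idxs_possibleSets_py idxs_possibleSets setsIndexes indexes removeFromIndexesAlso → Spec_assignIdxsWith1PossibleSet_thenRemoveFrom_idxs_possibleSets_py idxs_possibleSets setsIndexes indexes removeFromIndexesAlso (assignIdxsWith1PossibleSet_thenRemoveFrom_idxs_possibleSets_py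 idxs_possibleSets setsIndexes indexes removeFromIndexesAlso)

-- ===== LEMMAS AND PROOFS =====

-- Both sides reduce to the plain filter keeping the non-singleton rows.
lemma a_eq_filter (ips si : List (Int × List Int)) (idxs : Option (List Int)) (rm : Bool)
    (hnd : (ips.map Prod.fst).Nodup) :
    assignIdxsWith1PossibleSet_thenRemoveFrom_idxs_possibleSets_py ips si idxs rm
      = ips.filter (fun p => !(p.2.length = 1 : Bool)) := by
  unfold assignIdxsWith1PossibleSet_thenRemoveFrom_idxs_possibleSets_py
  have hitems : (PySem.Dict.mk ips).items = ips := rfl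
  have hkeys : (PySem.Dict.mk ips).keys = ips.map Prod.fst := rfl
  have hfun : (fun (acc : List Int) (idx : Int) =>
        if ((PySem.Dict.mk ips).getD idx []).length = 1 then acc ++ [idx] else acc)
      = (fun acc idx =>
        if (((PySem.Dict.mk ips).getD idx []).length = 1 : Bool) = true then acc ++ [id idx]
        else acc) := by
    funext acc i; by_cases h : ((PySem.Dict.mk ips).getD i []).length = 1 <;> simp [h]
  simp only [hkeys, hfun, PySem.List.foldl_append_if, List.nil_append, List.map_id]
  apply List.filter_congr
  intro q hq
  have hget : (PySem.Dict.mk ips).getD q.1 [] = q.2 :=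
    PySem.Dict.getD_of_mem_items (PySem.Dict.mk ips) (by exact hq) (by exact hnd) []
  have hmem : q.1 ∈ ips.map Prod.fst := List.mem_map.mpr ⟨q, hq, rfl⟩
  simp [List.mem_filter, hget, hmem]

lemma b_eq_filter (ips si : List (Int × List Int)) (idxs : Option (List Int)) (rm : Bool)
    (hnd : (ips.map Prod.fst).Nodup) :
    assignIdxsWith1PossibleSet_thenRemoveFrom_idxs_possibleSets_py_alt ips si idxs rm
      = ips.filter (fun p => !(p.2.length = 1 : Bool)) := by
  unfold assignIdxsWith1PossibleSet_thenRemoveFrom_idxs_possibleSets_py_alt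
  have hfun : (fun (d : PySem.Dict Int (List Int)) (p : Int × List Int) =>
        if p.2.length = 1 then d else d.insert p.1 p.2)
      = (fun d p => if (!(p.2.length = 1 : Bool)) = true then d.insert p.1 p.2 else d) := by
    funext d p; by_cases h : p.2.length = 1 <;> simp [h]
  rw [hfun, ← List.foldl_filter]
  rw [PySem.Dict.items_foldl_insert_fresh _ Prod.fst Prod.snd PySem.Dict.empty
    (fun a _ => by simp [PySem.Dict.contains_empty])
    ((List.Sublist.map Prod.fst List.filter_sublist).nodup hnd)]
  simp [PySem.Dict.empty]

-- ===== VERDICT (by name: the statement is the Claim_ definition above) =====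
theorem assignIdxsWith1PossibleSet_thenRemoveFrom_idxs_possibleSets_py_spec : Claim_equal_assignIdxsWith1PossibleSet_thenRemoveFrom_idxs_possibleSets_py := by
  intro ips si idxs rm _hDom hPre
  unfold Spec_assignIdxsWith1PossibleSet_thenRemoveFrom_idxs_possibleSets_py
  rw [a_eq_filter ips si idxs rm hPre.1, b_eq_filter ips si idxs rm hPre.1]
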